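-- pv_equiv track=rewrite | github.com/LukeThorp/AdventOfCode2021 | 3/3.py | co2_looper
-- ===== SOURCE A (Python) =====
-- def co2_looper(bin_list, x):
--     if len(bin_list) > 1:
--         new_bin_list = []
--
--         ones_running_sum = 0
--         zeros_running_sum = 0
--
--         for item in bin_list:
--             if item[x] == '1':
--                 ones_running_sum+=1
--             if item[x] == '0':
--                 zeros_running_sum+=1
--
--         if ones_running_sum < zeros_running_sum:
--             for item in bin_list:
--                 if item[x] == '1':
--                     new_bin_list.append(item)
--         elif zeros_running_sum <= ones_running_sum:
--             for item in bin_list: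
--                 if item[x] == '0':
--                     new_bin_list.append(item)
--     else:
--         new_bin_list = bin_list
--     return new_bin_list
-- ===== SOURCE B (Python) =====
-- def co2_looper(bin_list, x):
--     if len(bin_list) <= 1:
--         return bin_list
--     ones = []
--     zeros = []
--     for item in bin_list:
--         if item[x] == '1':
--             ones.append(item)
--         elif item[x] == '0':
--             zeros.append(item)
--     return ones if len(ones) < len(zeros) else zeros
-- ===== Notes on version B (the rewrite author's own statement) =====
-- stated objective: simpler
-- what changed: Replaced A's count-then-refilter (one counting pass plus a second filtering pass chosen by the counts) by a single partitioning pass that builds both candidate lists at once and returns the shorter one (zeros on ties).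
import Mathlib
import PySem

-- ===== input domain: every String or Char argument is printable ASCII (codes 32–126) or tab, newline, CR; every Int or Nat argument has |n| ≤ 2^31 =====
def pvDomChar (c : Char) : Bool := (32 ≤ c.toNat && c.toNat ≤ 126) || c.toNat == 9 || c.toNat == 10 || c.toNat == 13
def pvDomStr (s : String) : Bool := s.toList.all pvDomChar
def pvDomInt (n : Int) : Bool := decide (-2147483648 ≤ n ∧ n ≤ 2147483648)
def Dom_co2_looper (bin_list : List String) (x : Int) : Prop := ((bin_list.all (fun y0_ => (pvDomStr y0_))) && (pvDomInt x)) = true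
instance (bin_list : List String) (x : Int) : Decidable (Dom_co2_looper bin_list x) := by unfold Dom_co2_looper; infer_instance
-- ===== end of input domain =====

-- B replaces A's count-then-refilter with a single partitioning pass building both candidate lists; objective: simpler. Return-value equivalence only.

-- ===== PORT A =====
def co2_looper (bin_list : List String) (x : Int) : List String :=
  if bin_list.length > 1 then
    let ones_running_sum : Nat :=
      bin_list.foldl (fun s item => if PySem.Str.pyGet? item x = some '1' then s + 1 else s) 0
    let zeros_running_sum : Nat :=
      bin_list.foldl (fun s item => if PySem.Str.pyGet? item x = some '0' then s + 1 else s) 0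
    if ones_running_sum < zeros_running_sum then
      bin_list.foldl (fun acc item => if PySem.Str.pyGet? item x = some '1' then acc ++ [item] else acc) []
    else if zeros_running_sum ≤ ones_running_sum then
      bin_list.foldl (fun acc item => if PySem.Str.pyGet? item x = some '0' then acc ++ [item] else acc) []
    else []
  else bin_list

-- ===== PORT B =====
def co2_looper_alt (bin_list : List String) (x : Int) : List String :=
  if bin_list.length ≤ 1 then bin_list
  else
    let p := bin_list.foldl (fun (oz : List String × List String) item =>
      if PySem.Str.pyGet? item x = some '1' then (oz.1 ++ [item], oz.2)
      else if PySem.Str.pyGet? item x = some '0' then (oz.1, oz.2 ++ [item])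
      else oz) (([] : List String), ([] : List String))
    if p.1.length < p.2.length then p.1 else p.2

-- ===== PRECONDITION & SPEC =====
-- Pre_ excludes exactly the inputs where A raises IndexError: lists of more than one
-- string in which some string has no character at (possibly negative) index x.
def Pre_co2_looper (bin_list : List String) (x : Int) : Prop :=
  bin_list.length ≤ 1 ∨ ∀ s ∈ bin_list, PySem.Raise.InRange s.toList.length x
instance (bin_list : List String) (x : Int) : Decidable (Pre_co2_looper bin_list x) := by
  unfold Pre_co2_looper; infer_instance
def pvWitness_co2_looper : List String × Int := (["10", "01", "00"], 1)

def Spec_co2_looper (bin_list : List String) (x : Int) (out : List String) : Prop := out = co2_looper_alt bin_list x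
instance (bin_list : List String) (x : Int) (out : List String) : Decidable (Spec_co2_looper bin_list x out) := by unfold Spec_co2_looper; infer_instance

-- ===== CLAIM (what is proved, stated in full; the proofs are below) =====
def Claim_equal_co2_looper : Prop := ∀ (bin_list : List String) (x : Int), Dom_co2_looper bin_list x → Pre_co2_looper bin_list x → Spec_co2_looper bin_list x (co2_looper bin_list x)

-- ===== LEMMAS AND PROOFS =====

-- counting fold = length of filter
theorem pv_count_fold {α : Type} (p : α → Prop) [DecidablePred p] (l : List α) (n : Nat) :
    l.foldl (fun s item => if p item then s + 1 else s) n
      = n + (l.filter (fun a => decide (p a))).length := by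
  induction l generalizing n with
  | nil => simp
  | cons a t ih =>
    by_cases h : p a <;> simp [List.foldl, List.filter, h, ih] <;> omega

-- appending fold = filter
theorem pv_append_fold {α : Type} (p : α → Prop) [DecidablePred p] (l : List α) (acc : List α) :
    l.foldl (fun acc item => if p item then acc ++ [item] else acc) acc
      = acc ++ l.filter (fun a => decide (p a)) := by
  induction l generalizing acc with
  | nil => simp
  | cons a t ih =>
    by_cases h : p a <;> simp [List.foldl, List.filter, h, ih]

-- the partitioning fold returns (filter p1, filter p0) when p1 and p0 are disjoint
theorem pv_partition_fold {α : Type} (p1 p0 : α → Prop) [DecidablePred p1] [DecidablePred p0]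
    (hd : ∀ a, p1 a → ¬ p0 a) (l : List α) (acc1 acc0 : List α) :
    l.foldl (fun (oz : List α × List α) item =>
      if p1 item then (oz.1 ++ [item], oz.2)
      else if p0 item then (oz.1, oz.2 ++ [item])
      else oz) (acc1, acc0)
      = (acc1 ++ l.filter (fun a => decide (p1 a)), acc0 ++ l.filter (fun a => decide (p0 a))) := by
  induction l generalizing acc1 acc0 with
  | nil => simp
  | cons a t ih =>
    by_cases h1 : p1 a
    · simp [List.foldl, List.filter, h1, hd a h1, ih]
    · by_cases h0 : p0 a <;> simp [List.foldl, List.filter, h1, h0, ih]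

-- ===== VERDICT (by name: the statement is the Claim_ definition above) =====
theorem co2_looper_spec : Claim_equal_co2_looper := by
  intro bin_list x _ _
  unfold Spec_co2_looper co2_looper co2_looper_alt
  by_cases hl : bin_list.length ≤ 1
  · simp [hl, Nat.lt_iff_add_one_le, Nat.not_lt.mpr hl]
  · have hgt : bin_list.length > 1 := Nat.lt_of_not_le hl
    simp only [hgt, hl, if_pos, if_neg, ite_true, ite_false, gt_iff_lt,
      if_neg (Nat.not_le.mpr (Nat.lt_of_not_le hl))]
    rw [pv_partition_fold (fun item => PySem.Str.pyGet? item x = some '1')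
          (fun item => PySem.Str.pyGet? item x = some '0')
          (by intro a h h'; rw [h] at h'; simp at h')]
    rw [pv_count_fold (fun item => PySem.Str.pyGet? item x = some '1'),
        pv_count_fold (fun item => PySem.Str.pyGet? item x = some '0')]
    rw [pv_append_fold (fun item => PySem.Str.pyGet? item x = some '1'),
        pv_append_fold (fun item => PySem.Str.pyGet? item x = some '0')]
    simp only [Nat.zero_add, List.nil_append]
    split_ifs with h1 h2
    · rfl
    · rfl
    · omega
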